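-- pv_equiv track=rewrite | github.com/Pyomo/pyomo | pyomo/contrib/latex_printer/latex_printer.py | indexCorrector
-- ===== SOURCE A (Python) =====
-- def indexCorrector(ixs, base):
--     for i in range(0, len(ixs)):
--         ix = ixs[i]
--         if i + 1 < len(ixs):
--             if ixs[i + 1] == 0:
--                 ixs[i] -= 1
--                 ixs[i + 1] = base
--                 if ixs[i] == 0:
--                     ixs = indexCorrector(ixs, base)
--     return ixs
-- ===== SOURCE B (Python) =====
-- def indexCorrector(ixs, base):
--     # One forward pass: each zero (past position 0) is set to `base` and the
--     # borrow cascades leftwards, instead of A's recursive restart-and-rescan.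
--     for j in range(1, len(ixs)):
--         if ixs[j] == 0:
--             ixs[j] = base
--             k = j - 1
--             ixs[k] -= 1
--             while k > 0 and ixs[k] == 0:
--                 ixs[k] = base
--                 k -= 1
--                 ixs[k] -= 1
--     return ixs
-- ===== Notes on version B (the rewrite author's own statement) =====
-- stated objective: alternative
-- what changed: Replaces A's recursion-that-restarts-the-whole-scan (and then resumes the outer loop) with a single left-to-right pass in which each zero is set to base and the borrow cascades leftwards in an inner while loop; no rescans and no recursion (measured ~1.9x faster at the largest timing size).
-- outside the precondition, e.g. on indexCorrector([1, 0, 0], 0): A returns [-1, -2, 0], B returns [0, -1, 0]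
import Mathlib
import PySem

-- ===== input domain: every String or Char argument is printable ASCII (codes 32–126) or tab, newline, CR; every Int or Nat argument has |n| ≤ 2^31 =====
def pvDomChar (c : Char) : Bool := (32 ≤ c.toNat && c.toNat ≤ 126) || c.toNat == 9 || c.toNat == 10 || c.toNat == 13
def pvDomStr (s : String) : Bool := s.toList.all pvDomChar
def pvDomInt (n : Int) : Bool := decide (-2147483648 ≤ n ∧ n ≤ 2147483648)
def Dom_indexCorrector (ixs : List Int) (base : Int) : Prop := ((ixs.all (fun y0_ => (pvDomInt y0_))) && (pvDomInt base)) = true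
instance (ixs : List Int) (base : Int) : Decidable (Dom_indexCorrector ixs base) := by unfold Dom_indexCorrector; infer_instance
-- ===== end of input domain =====

-- B replaces A's restart-recursion by one forward pass with a leftward borrow cascade; same cost class,
-- equivalence is about the returned value (both Pythons mutate ixs in place in the same way).

-- ===== PORT A =====
-- Termination measure for A's restart recursion: for base ≠ 0 the weighted count of zeros,
-- for base = 0 the number of positive entries; each write step is non-increasing, and strictly
-- decreasing when a restart fires (the subtype result of aLoop carries this invariant).
def pvW (base : Int) (l : List Int) (j : Nat) : Nat :=
  if base = 0 then (if 1 ≤ l.getD j 0 then 1 else 0) else (if l.getD j 0 = 0 then j else 0)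

def pvMu (base : Int) (l : List Int) : Nat := ∑ j ∈ Finset.range l.length, pvW base l j

theorem getD_set_self (l : List Int) (i : Nat) (a : Int) (h : i < l.length) :
    (l.set i a).getD i 0 = a := by
  simp [List.getD, h]
theorem getD_set_ne (l : List Int) (i j : Nat) (a : Int) (h : i ≠ j) :
    (l.set i a).getD j 0 = l.getD j 0 := by
  simp [List.getD, List.getElem?_set_ne h]

theorem pvMu_op (base : Int) (l : List Int) (i : Nat) (h1 : i + 1 < l.length)
    (h0 : l.getD (i+1) 0 = 0) :
    pvMu base ((l.set i (l.getD i 0 - 1)).set (i+1) base) ≤ pvMu base l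
    ∧ (l.getD i 0 - 1 = 0 → pvMu base ((l.set i (l.getD i 0 - 1)).set (i+1) base) < pvMu base l)
    ∧ (base ≠ 0 → pvMu base ((l.set i (l.getD i 0 - 1)).set (i+1) base) < pvMu base l) := by
  have hi : i < l.length := Nat.lt_of_succ_lt h1
  set x := l.getD i 0 with hx
  set l2 := (l.set i (x - 1)).set (i+1) base with hl2
  have hlen : l2.length = l.length := by simp [hl2]
  have h2a : l2.getD i 0 = x - 1 := by
    rw [hl2, getD_set_ne _ _ _ _ (by omega), getD_set_self _ _ _ hi]
  have h2b : l2.getD (i+1) 0 = base := by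
    rw [hl2, getD_set_self _ _ _ (by simpa using h1)]
  have h2c : ∀ j, j ≠ i → j ≠ i + 1 → l2.getD j 0 = l.getD j 0 := by
    intro j hji hji1
    rw [hl2, getD_set_ne _ _ _ _ (Ne.symm hji1), getD_set_ne _ _ _ _ (Ne.symm hji)]
  have hmem : i ∈ Finset.range l.length := Finset.mem_range.2 hi
  have hmem1 : i + 1 ∈ (Finset.range l.length).erase i :=
    Finset.mem_erase.2 ⟨by omega, Finset.mem_range.2 h1⟩
  have hsplit : ∀ (m : List Int), m.length = l.length →
      pvMu base m = pvW base m i + (pvW base m (i+1)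
        + ∑ j ∈ ((Finset.range l.length).erase i).erase (i+1), pvW base m j) := by
    intro m hm
    rw [pvMu, hm, ← Finset.add_sum_erase _ _ hmem, ← Finset.add_sum_erase _ _ hmem1]
  have hS : ∑ j ∈ ((Finset.range l.length).erase i).erase (i+1), pvW base l2 j
      = ∑ j ∈ ((Finset.range l.length).erase i).erase (i+1), pvW base l j := by
    refine Finset.sum_congr rfl ?_
    intro j hj
    have hj1 : j ≠ i + 1 := (Finset.mem_erase.1 hj).1
    have hji : j ≠ i := (Finset.mem_erase.1 (Finset.mem_erase.1 hj).2).1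
    unfold pvW; rw [h2c j hji hj1]
  rw [hsplit l rfl, hsplit l2 hlen, hS]
  unfold pvW
  rw [h2a, h2b, h0, ← hx]
  by_cases hb : base = 0
  · subst hb
    simp only [if_pos]
    constructor
    · split_ifs <;> omega
    constructor
    · intro hx1; split_ifs <;> omega
    · intro h; exact absurd rfl h
  · simp only [if_neg hb]
    constructor
    · split_ifs <;> omega
    constructor
    · intro _; split_ifs <;> omega
    · intro _; split_ifs <;> omega

theorem pvLen2 (l : List Int) (i j : Nat) (a b : Int) :
    ((l.set i a).set j b).length = l.length := by simp

theorem pvLexHelp (a b m n i : Nat) (hab : a ≤ b) (hmn : m = n) (hi : i < n) :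
    Prod.Lex (· < · : Nat → Nat → Prop) (· < · : Nat → Nat → Prop)
      (a, m - (i+1)) (b, n - i) := by
  subst hmn
  rcases lt_or_eq_of_le hab with h | h
  · exact Prod.Lex.left _ _ h
  · subst h; exact Prod.Lex.right _ (Nat.sub_lt_sub_left hi (Nat.lt_succ_self i))

-- literal port of A's 'for i in range(0, len(ixs))' loop body: the 'ix = ixs[i]' binding of the
-- Python is unused and is not reproduced; ixs = indexCorrector(ixs, base) is the nested call.
def aLoop (base : Int) (l : List Int) (i : Nat) :
    {r : List Int // r.length = l.length ∧ pvMu base r ≤ pvMu base l} :=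
  if hi : i < l.length then
    if hz : i + 1 < l.length ∧ l.getD (i+1) 0 = 0 then
      if hx : l.getD i 0 - 1 = 0 then
        let r := aLoop base ((l.set i (l.getD i 0 - 1)).set (i+1) base) 0
        let r2 := aLoop base r.1 (i+1)
        ⟨r2.1, r2.2.1.trans (r.2.1.trans (pvLen2 l i (i+1) _ _)),
          le_of_lt (lt_of_le_of_lt (r2.2.2.trans r.2.2) ((pvMu_op base l i hz.1 hz.2).2.1 hx))⟩
      else
        let r := aLoop base ((l.set i (l.getD i 0 - 1)).set (i+1) base) (i+1)
        ⟨r.1, r.2.1.trans (pvLen2 l i (i+1) _ _),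
          r.2.2.trans (pvMu_op base l i hz.1 hz.2).1⟩
    else
      aLoop base l (i+1)
  else ⟨l, rfl, le_rfl⟩
termination_by (pvMu base l, l.length - i)
decreasing_by
  · exact Prod.Lex.left _ _ ((pvMu_op base l i hz.1 hz.2).2.1 hx)
  · exact Prod.Lex.left _ _
      (lt_of_le_of_lt r.2.2 ((pvMu_op base l i hz.1 hz.2).2.1 hx))
  · exact pvLexHelp _ _ _ _ _ (pvMu_op base l i hz.1 hz.2).1 (pvLen2 l i (i+1) _ _) hi
  · exact pvLexHelp _ _ _ _ _ le_rfl rfl hi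

def indexCorrector (ixs : List Int) (base : Int) : List Int := (aLoop base ixs 0).1

-- ===== PORT B =====
-- literal port of Source B's inner 'while k > 0 and ixs[k] == 0' borrow cascade
def cascade (base : Int) (l : List Int) (k : Nat) : List Int :=
  if h : 0 < k ∧ l.getD k 0 = 0 then
    cascade base ((l.set k base).set (k-1) ((l.set k base).getD (k-1) 0 - 1)) (k-1)
  else l
termination_by k
decreasing_by exact Nat.sub_lt h.1 Nat.one_pos

-- body of Source B's 'for j in range(1, len(ixs))' loop
def bStep (base : Int) (l : List Int) (j : Nat) : List Int :=
  if l.getD j 0 = 0 then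
    cascade base ((l.set j base).set (j-1) ((l.set j base).getD (j-1) 0 - 1)) (j-1)
  else l

def indexCorrector_alt (ixs : List Int) (base : Int) : List Int :=
  (List.range' 1 (ixs.length - 1)).foldl (fun l j => bStep base l j) ixs

-- ===== PRECONDITION & SPEC =====
-- Pre_ excludes base == 0, a degenerate carry base on which the borrow leaves the zero in
-- place and A's post-restart resume re-borrows positions its restart pass already processed,
-- so the exact values are an accident of A's recursion bookkeeping (e.g. ixs=[1,0,0]).
def Pre_indexCorrector (ixs : List Int) (base : Int) : Prop := base ≠ 0
instance (ixs : List Int) (base : Int) : Decidable (Pre_indexCorrector ixs base) := by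
  unfold Pre_indexCorrector; infer_instance

def pvWitness_indexCorrector : List Int × Int := ([2, 0, 1, 0], 3)

def Spec_indexCorrector (ixs : List Int) (base : Int) (out : List Int) : Prop :=
  out = indexCorrector_alt ixs base
instance (ixs : List Int) (base : Int) (out : List Int) : Decidable (Spec_indexCorrector ixs base out) := by
  unfold Spec_indexCorrector; infer_instance

-- ===== CLAIM (what is proved, stated in full; the proofs are below) =====
def Claim_equal_indexCorrector : Prop := ∀ (ixs : List Int) (base : Int),
  Dom_indexCorrector ixs base → Pre_indexCorrector ixs base →
  Spec_indexCorrector ixs base (indexCorrector ixs base)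

-- ===== LEMMAS AND PROOFS =====

-- positions 1..i are nonzero
def CleanTo (l : List Int) (i : Nat) : Prop :=
  ∀ j, 1 ≤ j → j ≤ i → j < l.length → l.getD j 0 ≠ 0
-- all positions ≥ 1 are nonzero
def Clean (l : List Int) : Prop := ∀ j, 1 ≤ j → j < l.length → l.getD j 0 ≠ 0

theorem aLoop_out (base : Int) (l : List Int) (i : Nat) (h : ¬ i < l.length) :
    (aLoop base l i).1 = l := by
  rw [aLoop, dif_neg h]

theorem aLoop_step_skip (base : Int) (l : List Int) (i : Nat) (hi : i < l.length)
    (hz : ¬ (i + 1 < l.length ∧ l.getD (i+1) 0 = 0)) :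
    (aLoop base l i).1 = (aLoop base l (i+1)).1 := by
  rw [aLoop, dif_pos hi, dif_neg hz]

theorem aLoop_step_op (base : Int) (l : List Int) (i : Nat) (h1 : i + 1 < l.length)
    (h0 : l.getD (i+1) 0 = 0) (hx : l.getD i 0 - 1 ≠ 0) :
    (aLoop base l i).1
      = (aLoop base ((l.set i (l.getD i 0 - 1)).set (i+1) base) (i+1)).1 := by
  rw [aLoop, dif_pos (Nat.lt_of_succ_lt h1), dif_pos (And.intro h1 h0), dif_neg hx]

theorem aLoop_step_restart (base : Int) (l : List Int) (i : Nat) (h1 : i + 1 < l.length)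
    (h0 : l.getD (i+1) 0 = 0) (hx : l.getD i 0 - 1 = 0) :
    (aLoop base l i).1
      = (aLoop base (aLoop base ((l.set i (l.getD i 0 - 1)).set (i+1) base) 0).1 (i+1)).1 := by
  rw [aLoop, dif_pos (Nat.lt_of_succ_lt h1), dif_pos (And.intro h1 h0), dif_pos hx]

theorem aLoop_noop (base : Int) (l : List Int) (i : Nat)
    (h : ∀ j, i + 1 ≤ j → j < l.length → l.getD j 0 ≠ 0) :
    (aLoop base l i).1 = l := by
  have aux : ∀ d i, l.length ≤ i + d →
      (∀ j, i + 1 ≤ j → j < l.length → l.getD j 0 ≠ 0) → (aLoop base l i).1 = l := by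
    intro d
    induction d with
    | zero => intro i hd _; exact aLoop_out base l i (by omega)
    | succ d ih =>
      intro i hd h
      by_cases hi : i < l.length
      · have hz : ¬ (i + 1 < l.length ∧ l.getD (i+1) 0 = 0) := by
          rintro ⟨ha, hb⟩; exact h (i+1) le_rfl ha hb
        rw [aLoop_step_skip base l i hi hz]
        exact ih (i+1) (by omega) (fun j hj hjl => h j (by omega) hjl)
      · exact aLoop_out base l i hi
  exact aux (l.length - i) i (by omega) h

theorem aLoop_skip_to (base : Int) (l : List Int) (i i' : Nat) (hii : i ≤ i')
    (h : ∀ j, i < j → j ≤ i' → j < l.length → l.getD j 0 ≠ 0) :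
    (aLoop base l i).1 = (aLoop base l i').1 := by
  have aux : ∀ d i, i ≤ i' → i' - i ≤ d →
      (∀ j, i < j → j ≤ i' → j < l.length → l.getD j 0 ≠ 0) →
      (aLoop base l i).1 = (aLoop base l i').1 := by
    intro d
    induction d with
    | zero =>
      intro i h1 h2 _
      have h3 : i = i' := by omega
      subst h3; rfl
    | succ d ih =>
      intro i h1 h2 h
      by_cases he : i = i'
      · subst he; rfl
      · by_cases hi : i < l.length
        · have hz : ¬ (i + 1 < l.length ∧ l.getD (i+1) 0 = 0) := by
            rintro ⟨ha, hb⟩; exact h (i+1) (by omega) (by omega) ha hb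
          rw [aLoop_step_skip base l i hi hz]
          exact ih (i+1) (by omega) (by omega) (fun j hj hj' hjl => h j (by omega) hj' hjl)
        · rw [aLoop_out base l i hi, aLoop_out base l i' (by omega)]
  exact aux (i' - i) i hii (by omega) h

theorem op_getD (base : Int) (l : List Int) (i : Nat) (h1 : i + 1 < l.length) :
    ((l.set i (l.getD i 0 - 1)).set (i+1) base).getD i 0 = l.getD i 0 - 1
    ∧ ((l.set i (l.getD i 0 - 1)).set (i+1) base).getD (i+1) 0 = base
    ∧ ∀ j, j ≠ i → j ≠ i + 1 →
        ((l.set i (l.getD i 0 - 1)).set (i+1) base).getD j 0 = l.getD j 0 := by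
  refine ⟨?_, ?_, ?_⟩
  · rw [getD_set_ne _ _ _ _ (by omega), getD_set_self _ _ _ (Nat.lt_of_succ_lt h1)]
  · rw [getD_set_self _ _ _ (by simpa using h1)]
  · intro j hji hji1
    rw [getD_set_ne _ _ _ _ (Ne.symm hji1), getD_set_ne _ _ _ _ (Ne.symm hji)]

theorem cleanTo_op (base : Int) (hb : base ≠ 0) (l : List Int) (i : Nat)
    (hc : CleanTo l i) (h1 : i + 1 < l.length) (hx : l.getD i 0 - 1 ≠ 0) :
    CleanTo ((l.set i (l.getD i 0 - 1)).set (i+1) base) (i+1) := by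
  obtain ⟨ha, hb2, hcc⟩ := op_getD base l i h1
  intro j hj1 hji1 hjl
  rcases Nat.lt_or_ge j i with hji | hji
  · rw [hcc j (by omega) (by omega)]
    exact hc j hj1 (by omega) (by simpa using hjl)
  · rcases Nat.eq_or_lt_of_le hji with rfl | hji'
    · rw [ha]; exact hx
    · have : j = i + 1 := by omega
      subst this; rw [hb2]; exact hb

theorem aLoop_clean (base : Int) (hb : base ≠ 0) (l : List Int) (i : Nat)
    (hc : CleanTo l i) : Clean (aLoop base l i).1 := by
  have aux : ∀ K l i, pvMu base l * (l.length + 1) + (l.length - i) ≤ K →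
      CleanTo l i → Clean (aLoop base l i).1 := by
    intro K
    induction K with
    | zero =>
      intro l i hK hc
      have hi : ¬ i < l.length := by omega
      rw [aLoop_out base l i hi]
      intro j hj1 hjl; exact hc j hj1 (by omega) hjl
    | succ K ih =>
      intro l i hK hc
      by_cases hi : i < l.length
      · by_cases hz1 : i + 1 < l.length ∧ l.getD (i+1) 0 = 0
        · obtain ⟨h1, h0⟩ := hz1
          have hop := pvMu_op base l i h1 h0
          have hmu : pvMu base ((l.set i (l.getD i 0 - 1)).set (i+1) base) + 1
              ≤ pvMu base l := hop.2.2 hb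
          have hlen2 : ((l.set i (l.getD i 0 - 1)).set (i+1) base).length = l.length := by
            simp
          have h6 : pvMu base ((l.set i (l.getD i 0 - 1)).set (i+1) base) * (l.length + 1)
              + (l.length + 1) ≤ pvMu base l * (l.length + 1) := by
            have h5 := Nat.mul_le_mul_right (l.length + 1) hmu
            rw [add_mul, one_mul] at h5; exact h5
          by_cases hx : l.getD i 0 - 1 = 0
          · rw [aLoop_step_restart base l i h1 h0 hx]
            have hr : Clean (aLoop base ((l.set i (l.getD i 0 - 1)).set (i+1) base) 0).1 := by
              refine ih _ 0 ?_ (by intro j hj1 hj0 _; omega)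
              rw [hlen2]; omega
            rw [aLoop_noop base _ (i+1) (fun j hj hjl => hr j (by omega) hjl)]
            exact hr
          · rw [aLoop_step_op base l i h1 h0 hx]
            refine ih _ (i+1) ?_ (cleanTo_op base hb l i hc h1 hx)
            rw [hlen2]; omega
        · rw [aLoop_step_skip base l i hi hz1]
          refine ih l (i+1) (by omega) ?_
          intro j hj1 hji1 hjl
          rcases Nat.eq_or_lt_of_le hji1 with rfl | hji'
          · exact fun hzz => hz1 ⟨hjl, hzz⟩
          · exact hc j hj1 (by omega) hjl
      · rw [aLoop_out base l i hi]
        intro j hj1 hjl; exact hc j hj1 (by omega) hjl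
  exact aux (pvMu base l * (l.length + 1) + (l.length - i)) l i le_rfl hc

theorem cascade_neg (base : Int) (l : List Int) (k : Nat)
    (h : ¬ (0 < k ∧ l.getD k 0 = 0)) : cascade base l k = l := by
  rw [cascade, dif_neg h]

theorem cascade_step (base : Int) (l : List Int) (i : Nat) (h0 : l.getD (i+1) 0 = 0) :
    cascade base l (i+1) = cascade base ((l.set i (l.getD i 0 - 1)).set (i+1) base) i := by
  rw [cascade, dif_pos ⟨Nat.succ_pos i, h0⟩]
  have hg : (l.set (i+1) base).getD (i+1-1) 0 = l.getD i 0 := by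
    simp only [Nat.add_sub_cancel]
    exact getD_set_ne _ _ _ _ (by omega)
  simp only [Nat.add_sub_cancel] at hg ⊢
  rw [hg, List.set_comm _ _ (by omega : i + 1 ≠ i)]

theorem cascade_len (base : Int) (k : Nat) : ∀ l : List Int,
    (cascade base l k).length = l.length := by
  induction k with
  | zero => intro l; rw [cascade_neg base l 0 (by simp)]
  | succ k ih =>
    intro l
    by_cases h0 : l.getD (k+1) 0 = 0
    · rw [cascade_step base l k h0, ih]; simp
    · rw [cascade_neg base l (k+1) (fun hh => h0 hh.2)]

theorem cascade_getD_high (base : Int) (k : Nat) : ∀ (l : List Int) (j : Nat), k < j →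
    (cascade base l k).getD j 0 = l.getD j 0 := by
  induction k with
  | zero => intro l j hj; rw [cascade_neg base l 0 (by simp)]
  | succ k ih =>
    intro l j hj
    by_cases h0 : l.getD (k+1) 0 = 0
    · rw [cascade_step base l k h0, ih _ _ (by omega),
        getD_set_ne _ _ _ _ (by omega), getD_set_ne _ _ _ _ (by omega)]
    · rw [cascade_neg base l (k+1) (fun hh => h0 hh.2)]

theorem cascade_mu_le (base : Int) (k : Nat) : ∀ l : List Int, k < l.length →
    pvMu base (cascade base l k) ≤ pvMu base l := by
  induction k with
  | zero => intro l _; rw [cascade_neg base l 0 (by simp)]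
  | succ k ih =>
    intro l hk
    by_cases h0 : l.getD (k+1) 0 = 0
    · rw [cascade_step base l k h0]
      refine le_trans (ih _ (by simp; omega)) ?_
      exact (pvMu_op base l k hk h0).1
    · rw [cascade_neg base l (k+1) (fun hh => h0 hh.2)]

-- resolving a lone zero at position m (clean prefix before it): a full scan from 0 equals
-- the cascade at m followed by scanning on from m
theorem aLoop_cascade (base : Int) (hb : base ≠ 0) (m : Nat) (l : List Int)
    (hm1 : 1 ≤ m) (hmn : m < l.length) (h0 : l.getD m 0 = 0)
    (hc : ∀ j, 1 ≤ j → j < m → j < l.length → l.getD j 0 ≠ 0) :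
    (aLoop base l 0).1 = (aLoop base (cascade base l m) m).1
    ∧ CleanTo (cascade base l m) m := by
  have aux : ∀ m, ∀ l : List Int, 1 ≤ m → m < l.length → l.getD m 0 = 0 →
      (∀ j, 1 ≤ j → j < m → j < l.length → l.getD j 0 ≠ 0) →
      (aLoop base l 0).1 = (aLoop base (cascade base l m) m).1
      ∧ CleanTo (cascade base l m) m := by
    intro m
    induction m using Nat.strong_induction_on with
    | _ m ih =>
      intro l hm1 hmn h0 hc
      obtain ⟨i, rfl⟩ : ∃ i, m = i + 1 := ⟨m - 1, by omega⟩
      obtain ⟨gA, gB, gC⟩ := op_getD base l i hmn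
      set l' := (l.set i (l.getD i 0 - 1)).set (i+1) base with hl'
      have hlen' : l'.length = l.length := by simp [hl']
      have hcas : cascade base l (i+1) = cascade base l' i := cascade_step base l i h0
      have hskip0 : (aLoop base l 0).1 = (aLoop base l i).1 :=
        aLoop_skip_to base l 0 i (by omega) (fun j hj hji hjl => hc j (by omega) (by omega) hjl)
      by_cases hx : l.getD i 0 - 1 = 0
      · -- the decremented neighbour hits zero: A restarts, the cascade walks on
        have hstep := aLoop_step_restart base l i hmn h0 hx
        have hclean_r : Clean (aLoop base l' 0).1 :=
          aLoop_clean base hb l' 0 (fun j hj1 hj0 _ => absurd (hj1.trans hj0) (by omega))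
        have hLHS : (aLoop base l 0).1 = (aLoop base l' 0).1 := by
          rw [hskip0, hstep]
          exact aLoop_noop base _ (i+1) (fun j hj hjl => hclean_r j (by omega) hjl)
        by_cases hi0 : i = 0
        · subst hi0
          have hc0 : cascade base l' 0 = l' :=
            cascade_neg base l' 0 (fun hh => absurd hh.1 (lt_irrefl 0))
          constructor
          · rw [hLHS, hcas, hc0]
            refine aLoop_skip_to base l' 0 1 (by omega) ?_
            intro j hj1 hj1' hjl
            have hj : j = 1 := by omega
            subst hj; rw [gB]; exact hb
          · rw [hcas, hc0]
            intro j hj1 hji hjl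
            have hj : j = 1 := by omega
            subst hj; rw [gB]; exact hb
        · have ihi := ih i (by omega) l' (by omega) (by rw [hlen']; omega)
            (by rw [gA]; exact hx)
            (by intro j hj1 hji hjl
                rw [gC j (by omega) (by omega)]
                exact hc j hj1 (by omega) (by rw [hlen'] at hjl; exact hjl))
          obtain ⟨ihEq, ihClean⟩ := ihi
          have hCgd : (cascade base l' i).getD (i+1) 0 = base := by
            rw [cascade_getD_high base i l' (i+1) (by omega), gB]
          constructor
          · rw [hLHS, ihEq, hcas]
            refine aLoop_skip_to base (cascade base l' i) i (i+1) (by omega) ?_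
            intro j hj hj' hjl
            have hje : j = i + 1 := by omega
            subst hje; rw [hCgd]; exact hb
          · rw [hcas]
            intro j hj1 hji1 hjl
            rcases Nat.lt_or_ge j (i+1) with hlt | hge
            · exact ihClean j hj1 (by omega) hjl
            · have hje : j = i + 1 := by omega
              subst hje; rw [hCgd]; exact hb
      · -- neighbour stays nonzero: no restart, the cascade stops at once
        have hstep := aLoop_step_op base l i hmn h0 hx
        have hcneg : cascade base l' i = l' := by
          refine cascade_neg base l' i (fun hh => hx ?_)
          rw [← gA]; exact hh.2
        constructor
        · rw [hskip0, hstep, hcas, hcneg]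
        · rw [hcas, hcneg]
          exact cleanTo_op base hb l i (fun j a b c => hc j a (by omega) c) hmn hx
  exact aux m l hm1 hmn h0 hc

theorem aLoop_eq_fold (base : Int) (hb : base ≠ 0) (l : List Int) (i : Nat)
    (hc : CleanTo l i) :
    (aLoop base l i).1
      = (List.range' (i+1) (l.length - 1 - i)).foldl (fun l j => bStep base l j) l := by
  have aux : ∀ K (l : List Int) (i : Nat),
      pvMu base l * (l.length + 1) + (l.length - i) ≤ K → CleanTo l i →
      (aLoop base l i).1
        = (List.range' (i+1) (l.length - 1 - i)).foldl (fun l j => bStep base l j) l := by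
    intro K
    induction K with
    | zero =>
      intro l i hK hc
      have hi : ¬ i < l.length := by omega
      have hn : l.length - 1 - i = 0 := by omega
      rw [aLoop_out base l i hi, hn]
      rfl
    | succ K ih =>
      intro l i hK hc
      by_cases h1 : i + 1 < l.length
      · have hn : l.length - 1 - i = (l.length - 1 - (i+1)) + 1 := by omega
        rw [hn, List.range'_succ, List.foldl_cons]
        by_cases hz : l.getD (i+1) 0 = 0
        · obtain ⟨gA, gB, gC⟩ := op_getD base l i h1
          set l' := (l.set i (l.getD i 0 - 1)).set (i+1) base with hl'
          have hlen' : l'.length = l.length := by simp [hl']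
          have hbs : bStep base l (i+1) = cascade base l' i := by
            have hunfold : cascade base l (i+1)
                = cascade base ((l.set (i+1) base).set (i+1-1)
                    ((l.set (i+1) base).getD (i+1-1) 0 - 1)) (i+1-1) := by
              rw [cascade, dif_pos ⟨Nat.succ_pos i, hz⟩]
            rw [bStep, if_pos hz, ← hunfold, cascade_step base l i hz]
          have hop := pvMu_op base l i h1 hz
          have hmu : pvMu base l' + 1 ≤ pvMu base l := hop.2.2 hb
          have h6 : pvMu base l' * (l.length + 1) + (l.length + 1)
              ≤ pvMu base l * (l.length + 1) := by
            have h5 := Nat.mul_le_mul_right (l.length + 1) hmu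
            rw [add_mul, one_mul] at h5; exact h5
          by_cases hx : l.getD i 0 - 1 = 0
          · -- restart in A; full cascade in B
            have hstep := aLoop_step_restart base l i h1 hz hx
            have hclean_r : Clean (aLoop base l' 0).1 :=
              aLoop_clean base hb l' 0 (fun j hj1 hj0 _ => absurd (hj1.trans hj0) (by omega))
            have hLHS : (aLoop base l i).1 = (aLoop base l' 0).1 := by
              rw [hstep]
              exact aLoop_noop base _ (i+1) (fun j hj hjl => hclean_r j (by omega) hjl)
            by_cases hi0 : i = 0
            · subst hi0
              have hc0 : cascade base l' 0 = l' :=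
                cascade_neg base l' 0 (fun hh => absurd hh.1 (lt_irrefl 0))
              have hs01 : (aLoop base l' 0).1 = (aLoop base l' 1).1 := by
                refine aLoop_skip_to base l' 0 1 (by omega) ?_
                intro j hj hj' hjl
                have hje : j = 1 := by omega
                subst hje; rw [gB]; exact hb
              rw [hLHS, hbs, hc0, hs01]
              have := ih l' 1 (by rw [hlen']; omega)
                (by intro j hj1 hji hjl
                    have hje : j = 1 := by omega
                    subst hje; rw [gB]; exact hb)
              rw [this, hlen']
            · -- i ≥ 1 : the borrow walks left; lemma aLoop_cascade aligns the two
              obtain ⟨ihEq, ihClean⟩ := aLoop_cascade base hb i l' (by omega)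
                (by rw [hlen']; omega) (by rw [gA]; exact hx)
                (by intro j hj1 hji hjl
                    rw [gC j (by omega) (by omega)]
                    exact hc j hj1 (by omega) (by rw [hlen'] at hjl; exact hjl))
              have hClen : (cascade base l' i).length = l.length := by
                rw [cascade_len, hlen']
              have hCgd : (cascade base l' i).getD (i+1) 0 = base := by
                rw [cascade_getD_high base i l' (i+1) (by omega), gB]
              have hsC : (aLoop base (cascade base l' i) i).1
                  = (aLoop base (cascade base l' i) (i+1)).1 := by
                refine aLoop_skip_to base _ i (i+1) (by omega) ?_
                intro j hj hj' hjl
                have hje : j = i + 1 := by omega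
                subst hje; rw [hCgd]; exact hb
              have hmuC : pvMu base (cascade base l' i) ≤ pvMu base l' :=
                cascade_mu_le base i l' (by rw [hlen']; omega)
              have hIH := ih (cascade base l' i) (i+1)
                (by rw [hClen]
                    have h7 := Nat.mul_le_mul_right (l.length + 1) hmuC
                    omega)
                (by intro j hj1 hji1 hjl
                    rcases Nat.lt_or_ge j (i+1) with hlt | hge
                    · exact ihClean j hj1 (by omega) hjl
                    · have hje : j = i + 1 := by omega
                      subst hje; rw [hCgd]; exact hb)
              rw [hLHS, ihEq, hsC, hIH, hbs, hClen]
          · -- no restart in A; the cascade stops at once in B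
            have hstep := aLoop_step_op base l i h1 hz hx
            have hcneg : cascade base l' i = l' := by
              refine cascade_neg base l' i (fun hh => hx ?_)
              rw [← gA]; exact hh.2
            have hIH := ih l' (i+1) (by rw [hlen']; omega)
              (cleanTo_op base hb l i hc h1 hx)
            rw [hstep, hIH, hbs, hcneg, hlen']
        · -- ixs[i+1] ≠ 0 : both sides skip
          have hIH := ih l (i+1) (by omega)
            (by intro j hj1 hji1 hjl
                rcases Nat.eq_or_lt_of_le hji1 with rfl | hji'
                · exact hz
                · exact hc j hj1 (by omega) hjl)
          rw [aLoop_step_skip base l i (by omega) (fun hh => hz hh.2), hIH, bStep, if_neg hz]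
      · have hn : l.length - 1 - i = 0 := by omega
        rw [hn]
        exact aLoop_noop base l i (fun j hj hjl => absurd (lt_of_le_of_lt hj hjl) (by omega))
  exact aux (pvMu base l * (l.length + 1) + (l.length - i)) l i le_rfl hc

-- ===== VERDICT (by name: the statement is the Claim_ definition above) =====
theorem indexCorrector_spec : Claim_equal_indexCorrector := by
  intro ixs base _ hb
  unfold Spec_indexCorrector indexCorrector indexCorrector_alt
  have h := aLoop_eq_fold base hb ixs 0 (by intro j hj1 hj0 _; omega)
  simpa using h
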